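-- pv_equiv track=rewrite | github.com/mazicwong/Some_Python_Project | ACM/cf/675E DP+greedy.py | solve
-- ===== SOURCE A (Python) =====
-- from collections import deque
--
-- def argmax(que, z): #二分求[i+1, a[i]]中a[x]最大的x
--     l = 0
--     r = len(que) - 1
--     while (l <= r):
--         mid = int((l + r) / 2)
--         x = que[mid]['i']
--         if (x <= z):
--             r = mid - 1
--         else:
--             l = mid + 1
--     return que[l]['i']
--
-- def solve(n, A):
--     a = [0] * (n + 1)
--     a[1:] = A
--     dp = [0] * (n + 1)
--     dp[n - 1] = 1
--     que = deque()
--     que.append({'i': n - 1, 'a': a[n - 1]})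
--     for i in range(n - 2, 0, -1):
--         if (a[i] >= n):
--             dp[i] = n - i
--         else:
--             x = argmax(que, a[i])
--             dp[i] = x - i + dp[x] + n - a[i]
--         while (len(que) > 0 and que[-1]['a'] < a[i]):
--             que.pop()
--         que.append({'i': i, 'a': a[i]})
--     return sum(dp)
-- ===== SOURCE B (Python) =====
-- def solve(n, A):
--     # Simpler: replace the monotonic deque + binary search with a direct
--     # backward-window scan for the argmax (largest index attaining the max).
--     a = [0] * (n + 1)
--     a[1:] = A
--     dp = [0] * (n + 1)
--     dp[n - 1] = 1
--     for i in range(n - 2, 0, -1):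
--         if a[i] >= n:
--             dp[i] = n - i
--         else:
--             x = i + 1
--             for j in range(i + 2, a[i] + 1):
--                 if a[j] >= a[x]:
--                     x = j
--             dp[i] = x - i + dp[x] + n - a[i]
--     return sum(dp)
-- ===== Notes on version B (the rewrite author's own statement) =====
-- stated objective: simpler
-- what changed: The monotonic deque maintained across iterations plus the binary search (argmax) are removed entirely; B finds the argmax of each window [i+1, a[i]] by a direct ascending scan keeping the last maximizer, so no auxiliary structure is maintained between iterations.
import Mathlib
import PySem

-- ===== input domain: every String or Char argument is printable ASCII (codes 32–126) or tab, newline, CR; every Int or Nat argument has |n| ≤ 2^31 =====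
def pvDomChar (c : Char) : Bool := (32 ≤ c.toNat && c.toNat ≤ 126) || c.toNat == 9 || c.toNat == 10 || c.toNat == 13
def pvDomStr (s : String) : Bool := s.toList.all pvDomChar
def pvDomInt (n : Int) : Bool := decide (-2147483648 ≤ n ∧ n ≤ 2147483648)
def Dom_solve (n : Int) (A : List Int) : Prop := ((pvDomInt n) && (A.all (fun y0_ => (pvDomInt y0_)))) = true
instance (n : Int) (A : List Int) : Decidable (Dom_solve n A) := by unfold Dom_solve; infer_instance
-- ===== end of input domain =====

-- B replaces A's monotonic deque + binary search by a direct backward-window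
-- scan for the argmax (simpler: no auxiliary structure is maintained).

-- ===== PORT A =====
-- argmax(que, z): binary search for the first deque entry whose index is ≤ z.
-- mid = int((l+r)/2): inside the loop 0 ≤ l ≤ r, so truncation = floor division.
def argmaxLoop (que : List (Int × Int)) (z l r : Int) : Int :=
  if _h : l ≤ r then
    let mid := PySem.Int.floordiv (l + r) 2
    let x := (PySem.List.pyGetD que mid ((0:Int), (0:Int))).1
    if x ≤ z then argmaxLoop que z l (mid - 1)
    else argmaxLoop que z (mid + 1) r
  else (PySem.List.pyGetD que l ((0:Int), (0:Int))).1
termination_by (r + 1 - l).toNat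
decreasing_by
  · have := PySem.Int.floordiv_two_mid_bounds _h
    omega
  · have := PySem.Int.floordiv_two_mid_bounds _h
    omega

def argmax (que : List (Int × Int)) (z : Int) : Int :=
  argmaxLoop que z 0 ((que.length : Int) - 1)

-- while len(que) > 0 and que[-1]['a'] < a[i]: que.pop()
def popLoop (que : List (Int × Int)) (ai : Int) : List (Int × Int) :=
  if h : 0 < que.length ∧ (PySem.List.pyGetD que (-1) ((0:Int), (0:Int))).2 < ai then
    popLoop que.dropLast ai
  else que
termination_by que.length
decreasing_by
  have := h.1
  simp only [List.length_dropLast]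
  omega

-- loop body of A (dp, que as the mutable state)
def stepA (n : Int) (a : List Int) (st : List Int × List (Int × Int)) (i : Int) :
    List Int × List (Int × Int) :=
  let dp := st.1
  let que := st.2
  let ai := PySem.List.pyGetD a i 0
  let dp' :=
    if ai ≥ n then PySem.List.pySetD dp i (n - i)
    else
      let x := argmax que ai
      PySem.List.pySetD dp i (x - i + PySem.List.pyGetD dp x 0 + n - ai)
  (dp', popLoop que ai ++ [(i, ai)])

def solve (n : Int) (A : List Int) : Int :=
  -- a = [0]*(n+1); a[1:] = A  ⇒  a = [0] ++ A  (n ≥ 0 on every admitted input)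
  let a : List Int := 0 :: A
  let dp := PySem.List.pySetD (List.replicate (n + 1).toNat 0) (n - 1) 1
  let que : List (Int × Int) := [((n - 1 : Int), PySem.List.pyGetD a (n - 1) 0)]
  let st := (PySem.List.pyRange (n - 2) 0 (-1)).foldl (stepA n a) (dp, que)
  st.1.sum

-- ===== PORT B =====
-- loop body of B: the argmax over the window [i+1, a[i]] is found by a direct
-- ascending scan keeping the last (largest-index) maximizer.
def stepB (n : Int) (a : List Int) (dp : List Int) (i : Int) : List Int :=
  let ai := PySem.List.pyGetD a i 0
  if ai ≥ n then PySem.List.pySetD dp i (n - i)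
  else
    let x := (PySem.List.pyRange (i + 2) (ai + 1) 1).foldl
      (fun x j => if PySem.List.pyGetD a j 0 ≥ PySem.List.pyGetD a x 0 then j else x) (i + 1)
    PySem.List.pySetD dp i (x - i + PySem.List.pyGetD dp x 0 + n - ai)

def solve_alt (n : Int) (A : List Int) : Int :=
  let a : List Int := 0 :: A
  let dp0 := PySem.List.pySetD (List.replicate (n + 1).toNat 0) (n - 1) 1
  let dp := (PySem.List.pyRange (n - 2) 0 (-1)).foldl (stepB n a) dp0
  dp.sum

-- ===== PRECONDITION & SPEC =====
-- Pre_ = exactly the inputs where A returns: n ≥ 0 (else dp[n-1] is an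
-- IndexError), the list long enough for a[n-1] and the window accesses, and
-- the reachability chain i < a[i] for positions with a[i] < n (when it fails,
-- A's binary search runs off the deque and raises an IndexError).
def Pre_solve (n : Int) (A : List Int) : Prop :=
  0 ≤ n ∧ n - 1 ≤ (A.length : Int) ∧
  ∀ i : Nat, i < A.length → (i : Int) ≤ n - 3 →
    (A.getD i 0 < n → (i : Int) + 1 < A.getD i 0)
instance (n : Int) (A : List Int) : Decidable (Pre_solve n A) := by
  unfold Pre_solve; infer_instance

def pvWitness_solve : Int × List Int := (3, [2, 3, 1])

def Spec_solve (n : Int) (A : List Int) (out : Int) : Prop := out = solve_alt n A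
instance (n : Int) (A : List Int) (out : Int) : Decidable (Spec_solve n A out) := by
  unfold Spec_solve; infer_instance

-- ===== CLAIM (what is proved, stated in full; the proofs are below) =====
def Claim_equal_solve : Prop :=
  ∀ (n : Int) (A : List Int), Dom_solve n A → Pre_solve n A → Spec_solve n A (solve n A)

-- ===== LEMMAS AND PROOFS =====

-- x is the largest index in [m+1, z] attaining the maximum of aF on [m+1, z]
def IsBest (aF : Int → Int) (m z x : Int) : Prop :=
  m + 1 ≤ x ∧ x ≤ z ∧ (∀ j, m + 1 ≤ j → j ≤ z → aF j ≤ aF x) ∧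
    (∀ j, x < j → j ≤ z → aF j < aF x)

theorem isBest_unique (aF : Int → Int) (m z x y : Int)
    (hx : IsBest aF m z x) (hy : IsBest aF m z y) : x = y := by
  obtain ⟨hx1, hx2, hx3, hx4⟩ := hx
  obtain ⟨hy1, hy2, hy3, hy4⟩ := hy
  by_contra hne
  rcases lt_or_gt_of_ne hne with h | h
  · exact absurd (hy3 x hx1 hx2) (not_le.mpr (hx4 y h hy2))
  · exact absurd (hx3 y hy1 hy2) (not_le.mpr (hy4 x h hx2))

-- invariant of A's deque before processing index m: it holds exactly the
-- indices j ∈ [m+1, n-1] not dominated by a later (smaller) index, in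
-- strictly decreasing index order, paired with their a-values
def DequeInv (n : Int) (a : List Int) (que : List (Int × Int)) (m : Int) : Prop :=
  (∀ e : Int × Int, e ∈ que ↔
      (m + 1 ≤ e.1 ∧ e.1 ≤ n - 1 ∧ e.2 = PySem.List.pyGetD a e.1 0 ∧
        ∀ k, m + 1 ≤ k → k < e.1 → PySem.List.pyGetD a k 0 ≤ PySem.List.pyGetD a e.1 0)) ∧
    que.Pairwise (fun x y => y.1 < x.1)

theorem inv_val_pairwise {n : Int} {a : List Int} {que : List (Int × Int)} {m : Int}
    (h : DequeInv n a que m) : que.Pairwise (fun x y => y.2 ≤ x.2) := by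
  rw [List.pairwise_iff_getElem]
  intro i j hi hj hij
  have hxi := (h.1 que[i]).mp (que.getElem_mem hi)
  have hxj := (h.1 que[j]).mp (que.getElem_mem hj)
  have hlt : que[j].1 < que[i].1 := List.pairwise_iff_getElem.mp h.2 i j hi hj hij
  rw [hxi.2.2.1, hxj.2.2.1]
  exact hxi.2.2.2 que[j].1 hxj.1 hlt

theorem popLoop_eq_filter (ai : Int) (que : List (Int × Int))
    (hval : que.Pairwise (fun x y => y.2 ≤ x.2)) :
    popLoop que ai = que.filter (fun e => decide (ai ≤ e.2)) := by
  induction que using List.reverseRecOn with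
  | nil => rw [popLoop]; simp
  | append_singleton l y ih =>
    rw [popLoop]
    by_cases hy : y.2 < ai
    · have hc : 0 < (l ++ [y]).length ∧
          (PySem.List.pyGetD (l ++ [y]) (-1) ((0:Int), (0:Int))).2 < ai := by
        constructor
        · simp
        · rw [PySem.List.pyGetD_neg_one_append_singleton]; exact hy
      rw [dif_pos hc]
      have hdl : (l ++ [y]).dropLast = l := by simp
      rw [hdl, ih (hval.sublist (by simp))]
      rw [List.filter_append]
      simp [hy, not_le.mpr hy]
    · have hc : ¬ (0 < (l ++ [y]).length ∧
          (PySem.List.pyGetD (l ++ [y]) (-1) ((0:Int), (0:Int))).2 < ai) := by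
        rw [PySem.List.pyGetD_neg_one_append_singleton]
        intro h
        exact hy h.2
      rw [dif_neg hc]
      symm
      apply List.filter_eq_self.mpr
      intro e he
      rcases List.mem_append.mp he with he | he
      · have : y.2 ≤ e.2 := by
          have := (List.pairwise_append.mp hval).2.2
          exact this e he y (by simp)
        simp only [decide_eq_true_eq]
        omega
      · simp only [List.mem_singleton] at he
        subst he
        simp only [decide_eq_true_eq]
        omega

-- one loop iteration preserves the deque invariant
theorem inv_step (n : Int) (a : List Int) (m : Int) (que : List (Int × Int))
    (hm : m ≤ n - 2) (hInv : DequeInv n a que m) :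
    DequeInv n a (popLoop que (PySem.List.pyGetD a m 0) ++ [(m, PySem.List.pyGetD a m 0)]) (m - 1) := by
  set aF : Int → Int := fun j => PySem.List.pyGetD a j 0 with haF
  rw [popLoop_eq_filter _ _ (inv_val_pairwise hInv)]
  have hrw : m - 1 + 1 = m := by ring
  unfold DequeInv
  simp only [hrw]
  constructor
  · intro e
    constructor
    · intro he
      rcases List.mem_append.mp he with he | he
      · have hmem := List.mem_filter.mp he
        have hold := (hInv.1 e).mp hmem.1
        have hcond : PySem.List.pyGetD a m 0 ≤ e.2 := by
          have := hmem.2; simpa using this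
        refine ⟨by omega, hold.2.1, hold.2.2.1, ?_⟩
        intro k hk1 hk2
        rcases eq_or_lt_of_le hk1 with hk | hk
        · rw [← hk]
          rw [hold.2.2.1] at hcond
          exact hcond
        · exact hold.2.2.2 k (by omega) hk2
      · simp only [List.mem_singleton] at he
        subst he
        refine ⟨by omega, by omega, rfl, ?_⟩
        intro k hk1 hk2
        simp only at hk1 hk2
        omega
    · rintro ⟨h1, h2, h3, h4⟩
      rcases eq_or_lt_of_le h1 with h | h
      · apply List.mem_append.mpr
        right
        have : e = (m, PySem.List.pyGetD a m 0) := by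
          have : e.1 = m := by omega
          rw [Prod.ext_iff]
          exact ⟨this, by rw [h3, this]⟩
        simp [this]
      · apply List.mem_append.mpr
        left
        apply List.mem_filter.mpr
        constructor
        · apply (hInv.1 e).mpr
          exact ⟨by omega, h2, h3, fun k hk1 hk2 => h4 k (by omega) hk2⟩
        · simp only [decide_eq_true_eq]
          rw [h3]
          exact h4 m (by omega) (by omega)
  · apply List.pairwise_append.mpr
    refine ⟨List.Pairwise.sublist List.filter_sublist hInv.2, List.pairwise_singleton _ _, ?_⟩
    intro x hx y hy
    simp only [List.mem_singleton] at hy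
    subst hy
    have := (hInv.1 x).mp (List.mem_filter.mp hx).1
    simp only
    omega

-- binary-search correctness: argmaxLoop returns the entry at the first
-- position whose index is ≤ z (indices strictly decrease along the deque)
theorem argmaxLoop_eq (que : List (Int × Int)) (z : Int) (fp : Nat)
    (hfp : fp < que.length) (hp : que[fp].1 ≤ z)
    (hprev : ∀ q : Nat, q < fp → (hq : q < que.length) → z < que[q].1)
    (hdec : que.Pairwise (fun x y => y.1 < x.1)) :
    ∀ l r : Int, 0 ≤ l → r < (que.length : Int) → l ≤ (fp : Int) → (fp : Int) ≤ r + 1 →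
      argmaxLoop que z l r = que[fp].1 := by
  intro l r
  induction hd : (r + 1 - l).toNat using Nat.strong_induction_on generalizing l r with
  | _ d ih =>
  intro hl0 hrlen hlfp hfpr
  rw [argmaxLoop]
  by_cases hlr : l ≤ r
  · rw [dif_pos hlr]
    have hmid := PySem.Int.floordiv_two_mid_bounds hlr
    set mid := PySem.Int.floordiv (l + r) 2 with hmiddef
    have hmid0 : 0 ≤ mid := by omega
    have hmidlen : mid < (que.length : Int) := by omega
    have hx : (PySem.List.pyGetD que mid ((0:Int), (0:Int))).1 = que[mid.toNat].1 := by
      rw [PySem.List.pyGetD_eq_getElem que ((0:Int), (0:Int)) hmid0 hmidlen]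
    have hmn : mid.toNat < que.length := by omega
    simp only [hx]
    by_cases hxz : que[mid.toNat].1 ≤ z
    · rw [if_pos hxz]
      have hfpmid : (fp : Int) ≤ mid := by
        by_contra hcon
        push_neg at hcon
        have := hprev mid.toNat (by omega) (by omega)
        omega
      exact ih (mid - 1 + 1 - l).toNat (by omega) l (mid - 1) (by omega) hl0 (by omega)
        hlfp (by omega)
    · rw [if_neg hxz]
      have hmidfp : mid < (fp : Int) := by
        by_contra hcon
        push_neg at hcon
        rcases eq_or_lt_of_le hcon with h | h
        · have heq : que[mid.toNat] = que[fp] := by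
            congr 1
            omega
          rw [heq] at hxz
          exact hxz hp
        · have h7 : que[mid.toNat].1 < que[fp].1 :=
            List.pairwise_iff_getElem.mp hdec fp mid.toNat hfp hmn (by omega)
          omega
      exact ih (r + 1 - (mid + 1)).toNat (by omega) (mid + 1) r (by omega) (by omega)
        hrlen (by omega) hfpr
  · rw [dif_neg hlr]
    have hleq : l = (fp : Int) := by omega
    rw [hleq, PySem.List.pyGetD_eq_getElem que ((0:Int), (0:Int)) (by omega)
      (by exact_mod_cast hfp)]
    simp

-- A's argmax satisfies the maximizer characterization
theorem argmax_isBest (n : Int) (a : List Int) (que : List (Int × Int)) (m z : Int)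
    (hInv : DequeInv n a que m) (hz1 : m + 1 ≤ z) (hz2 : z ≤ n - 1) :
    IsBest (fun j => PySem.List.pyGetD a j 0) m z (argmax que z) := by
  have hmem : ((m + 1, PySem.List.pyGetD a (m + 1) 0) : Int × Int) ∈ que := by
    apply (hInv.1 _).mpr
    refine ⟨le_refl _, by omega, rfl, ?_⟩
    intro k hk1 hk2
    exact absurd (show k < m + 1 from hk2) (by omega)
  have hex : ∃ e ∈ que, (fun e : Int × Int => decide (e.1 ≤ z)) e = true :=
    ⟨_, hmem, by simpa using hz1⟩
  set p : Int × Int → Bool := fun e => decide (e.1 ≤ z) with hpdef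
  set fp := que.findIdx p with hfpdef
  have hfp : fp < que.length := List.findIdx_lt_length_of_exists hex
  have hptrue : que[fp].1 ≤ z := by
    have := List.findIdx_getElem (w := hfp)
    simpa [hpdef] using this
  have hprev : ∀ q : Nat, q < fp → (hq : q < que.length) → z < que[q].1 := by
    intro q hq hqlen
    have h5 := List.not_of_lt_findIdx hq
    simpa [hpdef] using h5
  have hargmax : argmax que z = que[fp].1 := by
    rw [argmax]
    exact argmaxLoop_eq que z fp hfp hptrue hprev hInv.2 0 ((que.length : Int) - 1)
      (by omega) (by omega) (by omega) (by omega)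
  obtain ⟨hj01, hj02, _hj03, hj0dom⟩ := (hInv.1 que[fp]).mp (que.getElem_mem hfp)
  -- maximality of que[fp].1 among deque indices ≤ z
  have hmax : ∀ e ∈ que, e.1 ≤ z → e.1 ≤ que[fp].1 := by
    intro e he hez
    obtain ⟨q, hqlen, hq⟩ := List.getElem_of_mem he
    rcases lt_trichotomy q fp with h | h | h
    · have h7 := hprev q h hqlen
      rw [hq] at h7
      omega
    · subst h
      rw [← hq]
    · have h7 := List.pairwise_iff_getElem.mp hInv.2 fp q hfp hqlen h
      rw [hq] at h7
      exact le_of_lt h7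
  -- every index strictly between que[fp].1 and z has a strictly smaller a-value
  have hstrict : ∀ j, que[fp].1 < j → j ≤ z →
      PySem.List.pyGetD a j 0 < PySem.List.pyGetD a que[fp].1 0 := by
    have key : ∀ d : Nat, ∀ j : Int, (j - que[fp].1).toNat ≤ d → que[fp].1 < j → j ≤ z →
        PySem.List.pyGetD a j 0 < PySem.List.pyGetD a que[fp].1 0 := by
      intro d
      induction d with
      | zero => intro j hd hj1 _; omega
      | succ d ihd =>
        intro j hd hj1 hj2
        have hnotmem : ((j, PySem.List.pyGetD a j 0) : Int × Int) ∉ que := by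
          intro hin
          have h9 : j ≤ que[fp].1 := hmax _ hin (show j ≤ z from hj2)
          omega
        have hnot := (hInv.1 (j, PySem.List.pyGetD a j 0)).mpr.mt hnotmem
        push_neg at hnot
        obtain ⟨k, hk1, hk2, hk3⟩ :=
          hnot (show m + 1 ≤ j by omega) (show j ≤ n - 1 by omega) rfl
        have hk2' : k < j := hk2
        have hk3' : PySem.List.pyGetD a j 0 < PySem.List.pyGetD a k 0 := hk3
        rcases lt_trichotomy k que[fp].1 with h | h | h
        · have h8 := hj0dom k hk1 h
          omega
        · rw [h] at hk3'
          omega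
        · have h8 := ihd k (by omega) h (by omega)
          omega
    intro j hj1 hj2
    exact key (j - que[fp].1).toNat j (le_refl _) hj1 hj2
  rw [hargmax]
  refine ⟨hj01, hptrue, ?_, hstrict⟩
  intro j hjm hjz
  rcases lt_trichotomy j que[fp].1 with h | h | h
  · exact hj0dom j hjm h
  · exact le_of_eq (by rw [h])
  · exact le_of_lt (hstrict j h hjz)

-- B's ascending scan extends a maximizer of the window [m+1, t] to [m+1, z]
theorem scan_isBest (aF : Int → Int) (m z : Int) :
    ∀ (d : Nat) (t x : Int), (z - t).toNat ≤ d → t ≤ z → IsBest aF m t x →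
      IsBest aF m z ((PySem.List.pyRange (t + 1) (z + 1) 1).foldl
        (fun x j => if aF j ≥ aF x then j else x) x) := by
  intro d
  induction d with
  | zero =>
    intro t x hd htz hx
    have : t = z := by omega
    subst this
    rw [PySem.List.pyRange_one_eq_nil (by omega)]
    simpa using hx
  | succ d ihd =>
    intro t x hd htz hx
    rcases eq_or_lt_of_le htz with h | h
    · subst h
      rw [PySem.List.pyRange_one_eq_nil (by omega)]
      simpa using hx
    · rw [PySem.List.pyRange_one_cons (by omega), List.foldl_cons]
      have hstep : IsBest aF m (t + 1) (if aF (t + 1) ≥ aF x then t + 1 else x) := by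
        obtain ⟨hx1, hx2, hx3, hx4⟩ := hx
        by_cases hc : aF (t + 1) ≥ aF x
        · rw [if_pos hc]
          refine ⟨by omega, le_refl _, ?_, ?_⟩
          · intro j hj1 hj2
            rcases eq_or_lt_of_le hj2 with h | h
            · rw [h]
            · exact le_trans (hx3 j hj1 (by omega)) hc
          · intro j hj1 hj2
            omega
        · rw [if_neg hc]
          push_neg at hc
          refine ⟨hx1, by omega, ?_, ?_⟩
          · intro j hj1 hj2
            rcases eq_or_lt_of_le hj2 with h | h
            · rw [h]; exact le_of_lt hc
            · exact hx3 j hj1 (by omega)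
          · intro j hj1 hj2
            rcases eq_or_lt_of_le hj2 with h | h
            · rw [h]; exact hc
            · exact hx4 j hj1 (by omega)
      have := ihd (t + 1) _ (by omega) (by omega) hstep
      simpa using this

-- the two loop bodies keep dp identical while A's deque satisfies DequeInv
theorem foldAB (n : Int) (a : List Int)
    (haF : ∀ i : Int, 1 ≤ i → i ≤ n - 2 →
      PySem.List.pyGetD a i 0 < n → i < PySem.List.pyGetD a i 0) :
    ∀ (mN : Nat) (dp : List Int) (que : List (Int × Int)),
      ((mN : Int) ≤ n - 2) → DequeInv n a que (mN : Int) →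
      ((PySem.List.pyRange (mN : Int) 0 (-1)).foldl (stepA n a) (dp, que)).1
        = (PySem.List.pyRange (mN : Int) 0 (-1)).foldl (stepB n a) dp := by
  intro mN
  induction mN with
  | zero =>
    intro dp que _ _
    rw [PySem.List.pyRange_neg_one_eq_nil (by norm_num)]
    simp
  | succ k ih =>
    intro dp que hle hInv
    set m : Int := ((k + 1 : Nat) : Int) with hmdef
    have hm1 : 1 ≤ m := by omega
    rw [PySem.List.pyRange_neg_one_cons (show (0:Int) < m by omega)]
    simp only [List.foldl_cons]
    have hmk : m - 1 = ((k : Nat) : Int) := by omega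
    set ai := PySem.List.pyGetD a m 0 with haidef
    have hInv' : DequeInv n a (popLoop que ai ++ [(m, ai)]) ((k : Nat) : Int) := by
      rw [← hmk]
      exact inv_step n a m que (by omega) hInv
    by_cases hbig : ai ≥ n
    · have hA : stepA n a (dp, que) m =
          (PySem.List.pySetD dp m (n - m), popLoop que ai ++ [(m, ai)]) := by
        rw [stepA]
        simp only [← haidef, if_pos hbig]
      have hB : stepB n a dp m = PySem.List.pySetD dp m (n - m) := by
        rw [stepB]
        simp only [← haidef, if_pos hbig]
      rw [hA, hB, hmk]
      exact ih _ _ (by omega) hInv'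
    · push_neg at hbig
      have hchain : m < ai := haF m hm1 (by omega) hbig
      have hxeq : argmax que ai = (PySem.List.pyRange (m + 2) (ai + 1) 1).foldl
          (fun x j => if PySem.List.pyGetD a j 0 ≥ PySem.List.pyGetD a x 0 then j else x)
          (m + 1) := by
        apply isBest_unique (fun j => PySem.List.pyGetD a j 0) m ai
        · exact argmax_isBest n a que m ai hInv (by omega) (by omega)
        · have hbase : IsBest (fun j => PySem.List.pyGetD a j 0) m (m + 1) (m + 1) := by
            refine ⟨le_refl _, le_refl _, ?_, ?_⟩
            · intro j hj1 hj2
              have : j = m + 1 := by omega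
              rw [this]
            · intro j hj1 hj2
              omega
          have := scan_isBest (fun j => PySem.List.pyGetD a j 0) m ai
            (ai - (m + 1)).toNat (m + 1) (m + 1) (le_refl _) (by omega) hbase
          have harr : m + 1 + 1 = m + 2 := by ring
          rw [harr] at this
          exact this
      have hA : stepA n a (dp, que) m =
          (PySem.List.pySetD dp m (argmax que ai - m + PySem.List.pyGetD dp (argmax que ai) 0 + n - ai),
            popLoop que ai ++ [(m, ai)]) := by
        rw [stepA]
        simp only [← haidef, if_neg (not_le.mpr hbig)]
      have hB : stepB n a dp m = PySem.List.pySetD dp m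
          (argmax que ai - m + PySem.List.pyGetD dp (argmax que ai) 0 + n - ai) := by
        rw [stepB]
        simp only [← haidef, if_neg (not_le.mpr hbig), ← hxeq]
      rw [hA, hB, hmk]
      exact ih _ _ (by omega) hInv'

-- ===== VERDICT (by name: the statement is the Claim_ definition above) =====
theorem solve_spec : Claim_equal_solve := by
  unfold Claim_equal_solve Spec_solve
  intro n A _hDom hPre
  obtain ⟨hn0, hlen, hchain⟩ := hPre
  rw [solve, solve_alt]
  by_cases hsmall : n - 2 ≤ 0
  · rw [PySem.List.pyRange_neg_one_eq_nil (by omega)]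
    simp
  · push_neg at hsmall
    have haF : ∀ i : Int, 1 ≤ i → i ≤ n - 2 →
        PySem.List.pyGetD ((0 : Int) :: A) i 0 < n → i < PySem.List.pyGetD ((0 : Int) :: A) i 0 := by
      intro i h1 h2
      set iN := (i - 1).toNat with hiNdef
      have hi : i = (iN : Int) + 1 := by omega
      have hcast : (iN : Int) + 1 = ((iN + 1 : Nat) : Int) := by push_cast; ring
      have hval : PySem.List.pyGetD ((0 : Int) :: A) i 0 = A.getD iN 0 := by
        rw [hi, hcast, PySem.List.pyGetD_natCast]
        simp [List.getD]
      rw [hval, hi]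
      intro hlt
      have := hchain iN (by omega) (by omega) hlt
      omega
    have hcast2 : ((n - 2).toNat : Int) = n - 2 := by omega
    have hInv0 : DequeInv n ((0 : Int) :: A)
        [((n - 1 : Int), PySem.List.pyGetD ((0 : Int) :: A) (n - 1) 0)] ((n - 2).toNat : Int) := by
      constructor
      · intro e
        constructor
        · intro he
          simp only [List.mem_singleton] at he
          subst he
          refine ⟨by omega, by omega, rfl, ?_⟩
          intro k hk1 hk2
          simp only at hk1 hk2
          omega
        · rintro ⟨h1, h2, h3, _⟩
          simp only [List.mem_singleton]
          rw [hcast2] at h1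
          have he1 : e.1 = n - 1 := by omega
          rw [Prod.ext_iff]
          exact ⟨he1, by rw [h3, he1]⟩
      · exact List.pairwise_singleton _ _
    have := foldAB n ((0 : Int) :: A) haF (n - 2).toNat
      (PySem.List.pySetD (List.replicate (n + 1).toNat 0) (n - 1) 1)
      [((n - 1 : Int), PySem.List.pyGetD ((0 : Int) :: A) (n - 1) 0)]
      (by omega) hInv0
    rw [hcast2] at this
    rw [this]
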